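-- pv_equiv track=rewrite | github.com/novalym/velm | src/velm/parser_core/parser/parser_scribes/scaffold_scribes/directive_scribe/handlers/logic.py | _find_inline_delimiter
-- ===== SOURCE A (Python) =====
-- from typing import List, Optional, Set, Final, Dict, Any, Tuple
--
-- def _find_inline_delimiter(text: str) -> Tuple[int, str, int]:
--     """
--     =============================================================================
--     == THE JINJA-SHIELDED DELIMITER ORACLE (V-Ω-O(N)-DETERMINISM)              ==
--     =============================================================================
--     [ASCENSION 26]: A mathematically perfect, O(N) state-machine that parses
--     the string character by character. It tracks the depth of Jinja envelopes
--     and ONLY identifies inline actions if they exist in pure Architectural space.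
--
--     Returns: (split_index, delimiter_type, action_start_index)
--     """
--     in_sgf_var = False
--     in_sgf_block = False
--     length = len(text)
--
--     # Kinetic/Form sigils that signify an action follows the colon
--     action_sigils = {'>', ':', '+', '^', '~', '<', '?', '!', 'p', 'e', 'a', 'j', 's'}
--
--     for idx in range(length - 1):
--         pair = text[idx:idx + 2]
--
--         if pair == '{{':
--             in_sgf_var = True
--         elif pair == '}}':
--             in_sgf_var = False
--         elif pair == '{%':
--             in_sgf_block = True
--         elif pair == '%}':
--             in_sgf_block = False
--         elif not in_sgf_var and not in_sgf_block:
--             # -------------------------------------------------------------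
--             # 1. LEGACY ARROW CHECK (Slated for Annihilation)
--             # -------------------------------------------------------------
--             if pair == '->':
--                 return idx, 'legacy_arrow', idx + 2
--
--             # -------------------------------------------------------------
--             # 2. PYTHONIC COLON CHECK (The New Law)
--             # -------------------------------------------------------------
--             if text[idx] == ':':
--                 # We must verify that what follows is a valid action sigil,
--                 # not just a Python dictionary key inside a condition.
--                 # Look ahead, ignoring spaces, to find the next char.
--                 forward_idx = idx + 1
--                 while forward_idx < length and text[forward_idx].isspace():
--                     forward_idx += 1
--
--                 if forward_idx < length and text[forward_idx] in action_sigils: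
--                     # Verify the multi-char sigil logic
--                     lookahead_2 = text[forward_idx:forward_idx + 2]
--                     lookahead_4 = text[forward_idx:forward_idx + 4]
--
--                     valid_action = (
--                             lookahead_2 in ('>>', '::', '+=', '^=', '~=', '<<', '??', '!!', 'py', 'js', 'sh') or
--                             lookahead_4 in ('echo', 'proc', 'allo')
--                     )
--
--                     if valid_action:
--                         return idx, 'pythonic_colon', forward_idx
--
--     return -1, 'none', -1
-- ===== SOURCE B (Python) =====
-- def _find_inline_delimiter(text):
--     # Two-pass decomposition: first record the indices where a delimiter
--     # check applies (jinja-marker state machine), then examine only those.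
--     length = len(text)
--     eligible = []
--     in_var = False
--     in_block = False
--     for idx in range(length - 1):
--         pair = text[idx:idx + 2]
--         if pair == '{{':
--             in_var = True
--         elif pair == '}}':
--             in_var = False
--         elif pair == '{%':
--             in_block = True
--         elif pair == '%}':
--             in_block = False
--         elif not in_var and not in_block:
--             eligible.append(idx)
--     for idx in eligible:
--         if text[idx:idx + 2] == '->':
--             return idx, 'legacy_arrow', idx + 2
--         if text[idx] == ':':
--             hit = _colon_action(text, idx)
--             if hit is not None:
--                 return idx, 'pythonic_colon', hit
--     return -1, 'none', -1
--
--
-- def _colon_action(text, idx):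
--     length = len(text)
--     forward_idx = idx + 1
--     while forward_idx < length and text[forward_idx].isspace():
--         forward_idx += 1
--     if forward_idx < length and text[forward_idx] in '>:+^~<?!peajs':
--         if text[forward_idx:forward_idx + 2] in ('>>', '::', '+=', '^=', '~=', '<<', '??', '!!', 'py', 'js', 'sh') \
--                 or text[forward_idx:forward_idx + 4] in ('echo', 'proc', 'allo'):
--             return forward_idx
--     return None
-- ===== Notes on version B (the rewrite author's own statement) =====
-- stated objective: alternative
-- what changed: A's single early-return scan is decomposed into two passes: the jinja state machine first records every index where a delimiter check applies, then a second pass judges only those indices, with the colon-lookahead validation factored into a separate helper returning an Option.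
import Mathlib
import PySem

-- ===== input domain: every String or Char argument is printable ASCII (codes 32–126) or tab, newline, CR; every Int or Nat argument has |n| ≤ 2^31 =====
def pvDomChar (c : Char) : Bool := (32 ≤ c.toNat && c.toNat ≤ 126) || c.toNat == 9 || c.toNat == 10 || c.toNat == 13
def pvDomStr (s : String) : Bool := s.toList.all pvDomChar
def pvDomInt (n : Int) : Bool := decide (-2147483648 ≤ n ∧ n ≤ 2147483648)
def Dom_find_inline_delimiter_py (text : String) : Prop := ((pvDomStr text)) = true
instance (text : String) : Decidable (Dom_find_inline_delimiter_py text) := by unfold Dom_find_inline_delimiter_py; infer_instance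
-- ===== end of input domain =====

-- B replaces A's single early-return scan by two passes (record the eligible indices, then judge
-- only those) with the colon lookahead split into a helper; objective: alternative decomposition.

-- shared helpers: the whitespace-skip 'while' loop and the valid_action expression,
-- which both Pythons contain verbatim (fuel = remaining distance, so recursion is structural)
def pvSkipWsGo (cs : List Char) : Nat → Nat → Nat
  | 0, fwd => fwd
  | fuel + 1, fwd =>
    if h : fwd < cs.length then
      if PySem.Chars.isspace cs[fwd] then pvSkipWsGo cs fuel (fwd + 1) else fwd
    else fwd

def pvSkipWs (cs : List Char) (fwd : Nat) : Nat :=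
  pvSkipWsGo cs (cs.length - fwd) fwd

def pvValidAction (l2 l4 : List Char) : Bool :=
  decide ((l2 = ['>', '>'] ∨ l2 = [':', ':'] ∨ l2 = ['+', '='] ∨ l2 = ['^', '='] ∨
           l2 = ['~', '='] ∨ l2 = ['<', '<'] ∨ l2 = ['?', '?'] ∨ l2 = ['!', '!'] ∨
           l2 = ['p', 'y'] ∨ l2 = ['j', 's'] ∨ l2 = ['s', 'h']) ∨
          (l4 = ['e', 'c', 'h', 'o'] ∨ l4 = ['p', 'r', 'o', 'c'] ∨ l4 = ['a', 'l', 'l', 'o']))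

-- ===== PORT A =====
def find_inline_delimiter_py_go (cs : List Char) : Nat → Nat → Bool → Bool → Int × String × Int
  | 0, _, _, _ => (-1, "none", -1)
  | fuel + 1, idx, var, blk =>
    if _h : idx < cs.length - 1 then
      if (cs.drop idx).take 2 = ['{', '{'] then find_inline_delimiter_py_go cs fuel (idx + 1) true blk
      else if (cs.drop idx).take 2 = ['}', '}'] then find_inline_delimiter_py_go cs fuel (idx + 1) false blk
      else if (cs.drop idx).take 2 = ['{', '%'] then find_inline_delimiter_py_go cs fuel (idx + 1) var true
      else if (cs.drop idx).take 2 = ['%', '}'] then find_inline_delimiter_py_go cs fuel (idx + 1) var false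
      else if !var && !blk then
        if (cs.drop idx).take 2 = ['-', '>'] then ((idx : Int), "legacy_arrow", (idx : Int) + 2)
        else if cs[idx]? = some ':' then
          if hf : pvSkipWs cs (idx + 1) < cs.length then
            if ['>', ':', '+', '^', '~', '<', '?', '!', 'p', 'e', 'a', 'j', 's'].contains cs[pvSkipWs cs (idx + 1)] then
              if pvValidAction ((cs.drop (pvSkipWs cs (idx + 1))).take 2) ((cs.drop (pvSkipWs cs (idx + 1))).take 4) then
                ((idx : Int), "pythonic_colon", ((pvSkipWs cs (idx + 1)) : Int))
              else find_inline_delimiter_py_go cs fuel (idx + 1) var blk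
            else find_inline_delimiter_py_go cs fuel (idx + 1) var blk
          else find_inline_delimiter_py_go cs fuel (idx + 1) var blk
        else find_inline_delimiter_py_go cs fuel (idx + 1) var blk
      else find_inline_delimiter_py_go cs fuel (idx + 1) var blk
    else (-1, "none", -1)

def find_inline_delimiter_py (text : String) : Int × String × Int :=
  find_inline_delimiter_py_go text.toList (text.toList.length - 1) 0 false false

-- ===== PORT B =====
-- phase 1: the indices at which a delimiter check applies (jinja state machine)
def pvB_eligibleGo (cs : List Char) : Nat → Nat → Bool → Bool → List Nat
  | 0, _, _, _ => []
  | fuel + 1, idx, var, blk =>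
    if _h : idx < cs.length - 1 then
      if (cs.drop idx).take 2 = ['{', '{'] then pvB_eligibleGo cs fuel (idx + 1) true blk
      else if (cs.drop idx).take 2 = ['}', '}'] then pvB_eligibleGo cs fuel (idx + 1) false blk
      else if (cs.drop idx).take 2 = ['{', '%'] then pvB_eligibleGo cs fuel (idx + 1) var true
      else if (cs.drop idx).take 2 = ['%', '}'] then pvB_eligibleGo cs fuel (idx + 1) var false
      else if !var && !blk then idx :: pvB_eligibleGo cs fuel (idx + 1) var blk
      else pvB_eligibleGo cs fuel (idx + 1) var blk
    else []

-- helper _colon_action of Source B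
def pvB_colonAction? (cs : List Char) (idx : Nat) : Option Nat :=
  if hf : pvSkipWs cs (idx + 1) < cs.length then
    if (">:+^~<?!peajs".toList).contains cs[pvSkipWs cs (idx + 1)] then
      if pvValidAction ((cs.drop (pvSkipWs cs (idx + 1))).take 2)
          ((cs.drop (pvSkipWs cs (idx + 1))).take 4) then some (pvSkipWs cs (idx + 1))
      else none
    else none
  else none

-- phase 2: judge the recorded indices in order
def pvB_scan (cs : List Char) : List Nat → Int × String × Int
  | [] => (-1, "none", -1)
  | idx :: rest =>
    if (cs.drop idx).take 2 = ['-', '>'] then ((idx : Int), "legacy_arrow", (idx : Int) + 2)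
    else if cs[idx]? = some ':' then
      match pvB_colonAction? cs idx with
      | some fwd => ((idx : Int), "pythonic_colon", (fwd : Int))
      | none => pvB_scan cs rest
    else pvB_scan cs rest

def find_inline_delimiter_py_alt (text : String) : Int × String × Int :=
  pvB_scan text.toList (pvB_eligibleGo text.toList (text.toList.length - 1) 0 false false)

-- ===== PRECONDITION & SPEC =====
def Spec_find_inline_delimiter_py (text : String) (out : Int × String × Int) : Prop := out = find_inline_delimiter_py_alt text
instance (text : String) (out : Int × String × Int) : Decidable (Spec_find_inline_delimiter_py text out) := by unfold Spec_find_inline_delimiter_py; infer_instance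

-- ===== CLAIM (what is proved, stated in full; the proofs are below) =====
def Claim_equal_find_inline_delimiter_py : Prop := ∀ (text : String), Dom_find_inline_delimiter_py text → Spec_find_inline_delimiter_py text (find_inline_delimiter_py text)

-- ===== LEMMAS AND PROOFS =====
lemma pv_sigils_eq : ">:+^~<?!peajs".toList = ['>', ':', '+', '^', '~', '<', '?', '!', 'p', 'e', 'a', 'j', 's'] := by decide

lemma pv_go_eq_scan (cs : List Char) (fuel idx : Nat) (var blk : Bool) :
    find_inline_delimiter_py_go cs fuel idx var blk
      = pvB_scan cs (pvB_eligibleGo cs fuel idx var blk) := by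
  induction fuel generalizing idx var blk with
  | zero => rfl
  | succ fuel ih =>
    rw [find_inline_delimiter_py_go, pvB_eligibleGo]
    by_cases h : idx < cs.length - 1
    swap
    · rw [dif_neg h, dif_neg h]; rfl
    rw [dif_pos h, dif_pos h]
    by_cases h1 : (cs.drop idx).take 2 = ['{', '{']
    · rw [if_pos h1, if_pos h1]; exact ih _ _ _
    rw [if_neg h1, if_neg h1]
    by_cases h2 : (cs.drop idx).take 2 = ['}', '}']
    · rw [if_pos h2, if_pos h2]; exact ih _ _ _
    rw [if_neg h2, if_neg h2]
    by_cases h3 : (cs.drop idx).take 2 = ['{', '%']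
    · rw [if_pos h3, if_pos h3]; exact ih _ _ _
    rw [if_neg h3, if_neg h3]
    by_cases h4 : (cs.drop idx).take 2 = ['%', '}']
    · rw [if_pos h4, if_pos h4]; exact ih _ _ _
    rw [if_neg h4, if_neg h4]
    by_cases h5 : (!var && !blk) = true
    swap
    · rw [if_neg h5, if_neg h5]; exact ih _ _ _
    rw [if_pos h5, if_pos h5, pvB_scan]
    by_cases h6 : (cs.drop idx).take 2 = ['-', '>']
    · rw [if_pos h6, if_pos h6]
    rw [if_neg h6, if_neg h6]
    by_cases h7 : cs[idx]? = some ':'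
    swap
    · rw [if_neg h7, if_neg h7]; exact ih _ _ _
    rw [if_pos h7, if_pos h7]
    unfold pvB_colonAction?
    simp only [pv_sigils_eq]
    by_cases h8 : pvSkipWs cs (idx + 1) < cs.length
    swap
    · rw [dif_neg h8, dif_neg h8]; exact ih _ _ _
    rw [dif_pos h8, dif_pos h8]
    by_cases h9 : (['>', ':', '+', '^', '~', '<', '?', '!', 'p', 'e', 'a', 'j', 's'].contains
        (cs[pvSkipWs cs (idx + 1)]'h8)) = true
    swap
    · rw [if_neg h9, if_neg h9]; exact ih _ _ _
    rw [if_pos h9, if_pos h9]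
    by_cases h10 : pvValidAction ((cs.drop (pvSkipWs cs (idx + 1))).take 2)
        ((cs.drop (pvSkipWs cs (idx + 1))).take 4) = true
    · rw [if_pos h10, if_pos h10]
    · rw [if_neg h10, if_neg h10]; exact ih _ _ _

-- ===== VERDICT (by name: the statement is the Claim_ definition above) =====
theorem find_inline_delimiter_py_spec : Claim_equal_find_inline_delimiter_py := by
  intro text _
  unfold Spec_find_inline_delimiter_py find_inline_delimiter_py find_inline_delimiter_py_alt
  exact pv_go_eq_scan _ _ _ _ _
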